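-- pv_equiv track=rewrite | github.com/shawredanalytics/QuXAT | international_scoring_algorithm.py | _identify_certification_type
-- ===== SOURCE A (Python) =====
-- from typing import Dict, List, Any, Optional
--
-- def _identify_certification_type(cert_name: str) -> Optional[str]:
--     """Identify certification type from name with comprehensive international recognition"""
--
--     if not cert_name:
--         return None
--
--     cert_name = cert_name.upper()
--
--     # Global Standards
--     if 'JCI' in cert_name or 'JOINT COMMISSION INTERNATIONAL' in cert_name:
--         return 'JCI'
--     if 'WHO' in cert_name and ('CERTIFICATION' in cert_name or 'STANDARD' in cert_name):
--         return 'WHO_CERTIFICATION'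
--
--     # ISO Standards
--     iso_mappings = {
--         'ISO 9001': 'ISO_9001',
--         'ISO9001': 'ISO_9001',
--         'ISO 13485': 'ISO_13485',
--         'ISO13485': 'ISO_13485',
--         'ISO 15189': 'ISO_15189',
--         'ISO15189': 'ISO_15189',
--         'ISO 27001': 'ISO_27001',
--         'ISO27001': 'ISO_27001',
--         'ISO 45001': 'ISO_45001',
--         'ISO45001': 'ISO_45001',
--         'ISO 14001': 'ISO_14001',
--         'ISO14001': 'ISO_14001'
--     }
--
--     for iso_pattern, iso_type in iso_mappings.items():
--         if iso_pattern in cert_name: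
--             return iso_type
--
--     # Regional Excellence Standards
--     regional_mappings = {
--         'JOINT COMMISSION': 'JOINT_COMMISSION_US',
--         'MAGNET': 'MAGNET_RECOGNITION',
--         'DNV': 'DNV_HEALTHCARE',
--         'ACCREDITATION CANADA': 'ACCREDITATION_CANADA',
--         'CQC': 'CQC_UK',
--         'CARE QUALITY COMMISSION': 'CQC_UK',
--         'HAS': 'HAS_FRANCE',
--         'HAUTE AUTORITÉ': 'HAS_FRANCE',
--         'G-BA': 'G_BA_GERMANY',
--         'ACHS': 'ACHS_AUSTRALIA',
--         'JCQHC': 'JCQHC_JAPAN',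
--         'TJCHA': 'TJCHA_TAIWAN',
--         'NABH': 'NABH_INDIA',
--         'NABL': 'NABL',
--         'CBAHI': 'CBAHI_SAUDI',
--         'HAAD': 'HAAD_UAE',
--         'COHSASA': 'COHSASA_AFRICA'
--     }
--
--     for pattern, cert_type in regional_mappings.items():
--         if pattern in cert_name:
--             return cert_type
--
--     # Specialty Certifications
--     if 'CAP' in cert_name or 'COLLEGE OF AMERICAN PATHOLOGISTS' in cert_name:
--         return 'CAP'
--     if 'CLIA' in cert_name:
--         return 'CLIA_LABORATORY'
--     if 'EA' in cert_name and 'LABORATORY' in cert_name: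
--         return 'EA_LABORATORY'
--
--     return None
-- ===== SOURCE B (Python) =====
-- from typing import Optional
--
-- # All distinct substring patterns the classifier ever looks for.
-- _PATTERNS = [
--     'JCI', 'JOINT COMMISSION INTERNATIONAL', 'WHO', 'CERTIFICATION', 'STANDARD',
--     'ISO 9001', 'ISO9001', 'ISO 13485', 'ISO13485', 'ISO 15189', 'ISO15189',
--     'ISO 27001', 'ISO27001', 'ISO 45001', 'ISO45001', 'ISO 14001', 'ISO14001',
--     'JOINT COMMISSION', 'MAGNET', 'DNV', 'ACCREDITATION CANADA', 'CQC',
--     'CARE QUALITY COMMISSION', 'HAS', 'HAUTE AUTORIT\u00c9', 'G-BA', 'ACHS',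
--     'JCQHC', 'TJCHA', 'NABH', 'NABL', 'CBAHI', 'HAAD', 'COHSASA',
--     'CAP', 'COLLEGE OF AMERICAN PATHOLOGISTS', 'CLIA', 'EA', 'LABORATORY',
-- ]
--
-- # Priority-ordered rules in disjunctive normal form: each rule is the list of
-- # patterns that must ALL occur; the first satisfied rule gives the label.
-- _RULES = [
--     (['JCI'], 'JCI'),
--     (['JOINT COMMISSION INTERNATIONAL'], 'JCI'),
--     (['WHO', 'CERTIFICATION'], 'WHO_CERTIFICATION'),
--     (['WHO', 'STANDARD'], 'WHO_CERTIFICATION'),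
--     (['ISO 9001'], 'ISO_9001'),
--     (['ISO9001'], 'ISO_9001'),
--     (['ISO 13485'], 'ISO_13485'),
--     (['ISO13485'], 'ISO_13485'),
--     (['ISO 15189'], 'ISO_15189'),
--     (['ISO15189'], 'ISO_15189'),
--     (['ISO 27001'], 'ISO_27001'),
--     (['ISO27001'], 'ISO_27001'),
--     (['ISO 45001'], 'ISO_45001'),
--     (['ISO45001'], 'ISO_45001'),
--     (['ISO 14001'], 'ISO_14001'),
--     (['ISO14001'], 'ISO_14001'),
--     (['JOINT COMMISSION'], 'JOINT_COMMISSION_US'),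
--     (['MAGNET'], 'MAGNET_RECOGNITION'),
--     (['DNV'], 'DNV_HEALTHCARE'),
--     (['ACCREDITATION CANADA'], 'ACCREDITATION_CANADA'),
--     (['CQC'], 'CQC_UK'),
--     (['CARE QUALITY COMMISSION'], 'CQC_UK'),
--     (['HAS'], 'HAS_FRANCE'),
--     (['HAUTE AUTORIT\u00c9'], 'HAS_FRANCE'),
--     (['G-BA'], 'G_BA_GERMANY'),
--     (['ACHS'], 'ACHS_AUSTRALIA'),
--     (['JCQHC'], 'JCQHC_JAPAN'),
--     (['TJCHA'], 'TJCHA_TAIWAN'),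
--     (['NABH'], 'NABH_INDIA'),
--     (['NABL'], 'NABL'),
--     (['CBAHI'], 'CBAHI_SAUDI'),
--     (['HAAD'], 'HAAD_UAE'),
--     (['COHSASA'], 'COHSASA_AFRICA'),
--     (['CAP'], 'CAP'),
--     (['COLLEGE OF AMERICAN PATHOLOGISTS'], 'CAP'),
--     (['CLIA'], 'CLIA_LABORATORY'),
--     (['EA', 'LABORATORY'], 'EA_LABORATORY'),
-- ]
--
--
-- def _identify_certification_type(cert_name: str) -> Optional[str]:
--     if not cert_name:
--         return None
--     name = cert_name.upper()
--     # Phase 1: one left-to-right scan over the text collecting every pattern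
--     # that occurs anywhere in it.
--     hits = set()
--     for i in range(len(name)):
--         for p in _PATTERNS:
--             if name.startswith(p, i):
--                 hits.add(p)
--     # Phase 2: resolve the match set against the priority rule table.
--     for required, label in _RULES:
--         if all(r in hits for r in required):
--             return label
--     return None
-- ===== Notes on version B (the rewrite author's own statement) =====
-- stated objective: alternative
-- what changed: A's if-chain and two dict loops of repeated substring searches are replaced by two phases: one position scan over the text that collects the set of all occurring patterns via startswith, then a first-match resolution of that set against a priority rule table in disjunctive normal form (each rule = conjunction of required patterns).
import Mathlib
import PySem

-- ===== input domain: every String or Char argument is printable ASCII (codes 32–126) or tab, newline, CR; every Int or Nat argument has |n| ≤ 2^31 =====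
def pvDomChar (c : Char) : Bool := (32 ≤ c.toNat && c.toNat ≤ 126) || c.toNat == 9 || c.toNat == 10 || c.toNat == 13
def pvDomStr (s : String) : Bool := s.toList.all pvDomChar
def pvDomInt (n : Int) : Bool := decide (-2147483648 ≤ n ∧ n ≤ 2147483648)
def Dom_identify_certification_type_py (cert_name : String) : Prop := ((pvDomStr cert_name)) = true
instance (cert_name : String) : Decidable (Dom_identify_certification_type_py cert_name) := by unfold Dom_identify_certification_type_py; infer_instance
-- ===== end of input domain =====

-- B replaces A's chain of repeated substring searches by two phases: one position scan
-- collecting the set of occurring patterns, then a first-match DNF priority rule table.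

-- ===== PORT A =====

-- falling through a for-loop: use its result if it returned, else continue
def pvOrElse (o k : Option String) : Option String :=
  match o with
  | some t => some t
  | none => k

-- A's 'for pattern, type in mapping.items(): if pattern in name: return type'
def pvScanMap (name : String) : List (String × String) → Option String
  | [] => none
  | (p, t) :: rest => if PySem.Str.isIn p name then some t else pvScanMap name rest

def identify_certification_type_py (cert_name : String) : Option String :=
  if cert_name = "" then none
  else
    let n := PySem.Str.upper cert_name
    if PySem.Str.isIn "JCI" n || PySem.Str.isIn "JOINT COMMISSION INTERNATIONAL" n then some "JCI"
    else if PySem.Str.isIn "WHO" n && (PySem.Str.isIn "CERTIFICATION" n || PySem.Str.isIn "STANDARD" n) then some "WHO_CERTIFICATION"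
    else
      pvOrElse (pvScanMap n [("ISO 9001", "ISO_9001"), ("ISO9001", "ISO_9001"),
        ("ISO 13485", "ISO_13485"), ("ISO13485", "ISO_13485"),
        ("ISO 15189", "ISO_15189"), ("ISO15189", "ISO_15189"),
        ("ISO 27001", "ISO_27001"), ("ISO27001", "ISO_27001"),
        ("ISO 45001", "ISO_45001"), ("ISO45001", "ISO_45001"),
        ("ISO 14001", "ISO_14001"), ("ISO14001", "ISO_14001")])
      (pvOrElse (pvScanMap n [("JOINT COMMISSION", "JOINT_COMMISSION_US"), ("MAGNET", "MAGNET_RECOGNITION"),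
          ("DNV", "DNV_HEALTHCARE"), ("ACCREDITATION CANADA", "ACCREDITATION_CANADA"),
          ("CQC", "CQC_UK"), ("CARE QUALITY COMMISSION", "CQC_UK"),
          ("HAS", "HAS_FRANCE"), ("HAUTE AUTORITÉ", "HAS_FRANCE"),
          ("G-BA", "G_BA_GERMANY"), ("ACHS", "ACHS_AUSTRALIA"),
          ("JCQHC", "JCQHC_JAPAN"), ("TJCHA", "TJCHA_TAIWAN"),
          ("NABH", "NABH_INDIA"), ("NABL", "NABL"),
          ("CBAHI", "CBAHI_SAUDI"), ("HAAD", "HAAD_UAE"),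
          ("COHSASA", "COHSASA_AFRICA")])
        (if PySem.Str.isIn "CAP" n || PySem.Str.isIn "COLLEGE OF AMERICAN PATHOLOGISTS" n then some "CAP"
          else if PySem.Str.isIn "CLIA" n then some "CLIA_LABORATORY"
          else if PySem.Str.isIn "EA" n && PySem.Str.isIn "LABORATORY" n then some "EA_LABORATORY"
          else none))

-- ===== PORT B =====

-- Source B's _PATTERNS: all distinct substring patterns the classifier ever looks for
def pvPatterns : List String :=
  ["JCI", "JOINT COMMISSION INTERNATIONAL", "WHO", "CERTIFICATION", "STANDARD",
   "ISO 9001", "ISO9001", "ISO 13485", "ISO13485", "ISO 15189", "ISO15189",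
   "ISO 27001", "ISO27001", "ISO 45001", "ISO45001", "ISO 14001", "ISO14001",
   "JOINT COMMISSION", "MAGNET", "DNV", "ACCREDITATION CANADA", "CQC",
   "CARE QUALITY COMMISSION", "HAS", "HAUTE AUTORITÉ", "G-BA", "ACHS",
   "JCQHC", "TJCHA", "NABH", "NABL", "CBAHI", "HAAD", "COHSASA",
   "CAP", "COLLEGE OF AMERICAN PATHOLOGISTS", "CLIA", "EA", "LABORATORY"]

-- Source B's _RULES: priority-ordered DNF table; each rule = conjunction of required patterns
def pvRules : List (List String × String) :=
  [(["JCI"], "JCI"), (["JOINT COMMISSION INTERNATIONAL"], "JCI"),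
   (["WHO", "CERTIFICATION"], "WHO_CERTIFICATION"), (["WHO", "STANDARD"], "WHO_CERTIFICATION"),
   (["ISO 9001"], "ISO_9001"), (["ISO9001"], "ISO_9001"),
   (["ISO 13485"], "ISO_13485"), (["ISO13485"], "ISO_13485"),
   (["ISO 15189"], "ISO_15189"), (["ISO15189"], "ISO_15189"),
   (["ISO 27001"], "ISO_27001"), (["ISO27001"], "ISO_27001"),
   (["ISO 45001"], "ISO_45001"), (["ISO45001"], "ISO_45001"),
   (["ISO 14001"], "ISO_14001"), (["ISO14001"], "ISO_14001"),
   (["JOINT COMMISSION"], "JOINT_COMMISSION_US"), (["MAGNET"], "MAGNET_RECOGNITION"),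
   (["DNV"], "DNV_HEALTHCARE"), (["ACCREDITATION CANADA"], "ACCREDITATION_CANADA"),
   (["CQC"], "CQC_UK"), (["CARE QUALITY COMMISSION"], "CQC_UK"),
   (["HAS"], "HAS_FRANCE"), (["HAUTE AUTORITÉ"], "HAS_FRANCE"),
   (["G-BA"], "G_BA_GERMANY"), (["ACHS"], "ACHS_AUSTRALIA"),
   (["JCQHC"], "JCQHC_JAPAN"), (["TJCHA"], "TJCHA_TAIWAN"),
   (["NABH"], "NABH_INDIA"), (["NABL"], "NABL"),
   (["CBAHI"], "CBAHI_SAUDI"), (["HAAD"], "HAAD_UAE"),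
   (["COHSASA"], "COHSASA_AFRICA"),
   (["CAP"], "CAP"), (["COLLEGE OF AMERICAN PATHOLOGISTS"], "CAP"),
   (["CLIA"], "CLIA_LABORATORY"), (["EA", "LABORATORY"], "EA_LABORATORY")]

-- name.startswith(p, i): exact for 0 ≤ i (as produced by range(len(name)))
def pvStartsAt (n p : String) (i : Int) : Bool :=
  PySem.Chars.startswith (n.toList.drop i.toNat) p.toList

-- phase 1: 'for i in range(len(name)): for p in _PATTERNS: if name.startswith(p, i): hits.add(p)'
def pvHits (n : String) : PySem.Set String :=
  (PySem.List.pyRange 0 (PySem.Str.len n) 1).foldl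
    (fun hits i => pvPatterns.foldl
      (fun hits p => if pvStartsAt n p i then hits.add p else hits) hits)
    PySem.Set.empty

-- phase 2: 'for required, label in _RULES: if all(r in hits for r in required): return label'
def pvResolve (hits : PySem.Set String) : List (List String × String) → Option String
  | [] => none
  | (req, label) :: rest =>
      if req.all (fun r => hits.contains r) then some label else pvResolve hits rest

def identify_certification_type_py_alt (cert_name : String) : Option String :=
  if cert_name = "" then none
  else pvResolve (pvHits (PySem.Str.upper cert_name)) pvRules

-- ===== PRECONDITION & SPEC =====
def Spec_identify_certification_type_py (cert_name : String) (out : Option String) : Prop := out = identify_certification_type_py_alt cert_name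
instance (cert_name : String) (out : Option String) : Decidable (Spec_identify_certification_type_py cert_name out) := by unfold Spec_identify_certification_type_py; infer_instance

-- ===== CLAIM (what is proved, stated in full; the proofs are below) =====
def Claim_equal_identify_certification_type_py : Prop := ∀ (cert_name : String), Dom_identify_certification_type_py cert_name → Spec_identify_certification_type_py cert_name (identify_certification_type_py cert_name)

-- ===== LEMMAS AND PROOFS =====

theorem pvOrElse_scan_cons (n p t : String) (l : List (String × String)) (k : Option String) :
    pvOrElse (pvScanMap n ((p, t) :: l)) k =
      if PySem.Str.isIn p n then some t else pvOrElse (pvScanMap n l) k := by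
  simp only [pvScanMap]
  split_ifs <;> rfl

theorem pvOrElse_scan_nil (n : String) (k : Option String) :
    pvOrElse (pvScanMap n []) k = k := rfl

-- membership after the inner pattern fold
theorem mem_foldl_add_if (q : String → Bool) (l : List String) (s : PySem.Set String) (x : String) :
    x ∈ l.foldl (fun s p => if q p then s.add p else s) s ↔ x ∈ s ∨ (x ∈ l ∧ q x = true) := by
  induction l generalizing s with
  | nil => simp
  | cons a l ih =>
      simp only [List.foldl_cons, ih]
      by_cases hq : q a
      · simp only [if_pos hq, PySem.Set.mem_add, List.mem_cons]
        constructor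
        · rintro ((h | rfl) | ⟨h, hx⟩)
          · exact Or.inl h
          · exact Or.inr ⟨Or.inl rfl, hq⟩
          · exact Or.inr ⟨Or.inr h, hx⟩
        · rintro (h | ⟨(rfl | h), hx⟩)
          · exact Or.inl (Or.inl h)
          · exact Or.inl (Or.inr rfl)
          · exact Or.inr ⟨h, hx⟩
      · simp only [if_neg hq, List.mem_cons]
        constructor
        · rintro (h | ⟨h, hx⟩)
          · exact Or.inl h
          · exact Or.inr ⟨Or.inr h, hx⟩
        · rintro (h | ⟨(rfl | h), hx⟩)
          · exact Or.inl h
          · exact absurd hx hq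
          · exact Or.inr ⟨h, hx⟩

-- membership after the outer position fold
theorem mem_foldl_hits (n : String) (R : List Int) (s : PySem.Set String) (x : String) :
    x ∈ R.foldl (fun hits i => pvPatterns.foldl
        (fun hits p => if pvStartsAt n p i then hits.add p else hits) hits) s ↔
      x ∈ s ∨ (x ∈ pvPatterns ∧ ∃ i ∈ R, pvStartsAt n x i = true) := by
  induction R generalizing s with
  | nil => simp
  | cons a R ih =>
      simp only [List.foldl_cons, ih, mem_foldl_add_if, List.mem_cons]
      constructor
      · rintro ((h | ⟨hp, hs⟩) | ⟨hp, i, hi, hs⟩)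
        · exact Or.inl h
        · exact Or.inr ⟨hp, a, Or.inl rfl, hs⟩
        · exact Or.inr ⟨hp, i, Or.inr hi, hs⟩
      · rintro (h | ⟨hp, i, (rfl | hi), hs⟩)
        · exact Or.inl (Or.inl h)
        · exact Or.inl (Or.inr ⟨hp, hs⟩)
        · exact Or.inr ⟨hp, i, hi, hs⟩

-- a pattern is in the hit set exactly when it occurs in the text
theorem pvHits_contains (n p : String) (hmem : p ∈ pvPatterns) (hne : p.toList ≠ []) :
    (pvHits n).contains p = PySem.Str.isIn p n := by
  have hiff : (pvHits n).contains p = true ↔ PySem.Str.isIn p n = true := by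
    rw [PySem.Set.contains_iff]
    unfold pvHits
    rw [mem_foldl_hits]
    simp only [PySem.Set.empty, List.not_mem_nil, false_or]
    rw [PySem.Str.isIn_iff_infix, ← PySem.Chars.isIn_iff_infix,
      ← PySem.Chars.exists_prefix_drop_iff_isIn]
    constructor
    · rintro ⟨_, i, _, hs⟩
      exact ⟨i.toNat, (PySem.Chars.startswith_iff _ _).mp hs⟩
    · rintro ⟨j, hj⟩
      refine ⟨hmem, (j : Int), ?_, ?_⟩
      · rw [PySem.List.mem_pyRange_one]
        refine ⟨Int.natCast_nonneg j, ?_⟩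
        have hjlt : j < n.toList.length := by
          by_contra hge
          rw [List.drop_eq_nil_of_le (Nat.le_of_not_lt hge)] at hj
          exact hne (List.prefix_nil.mp hj)
        have : PySem.Str.len n = (n.toList.length : Int) := by
          simp [PySem.Str.len_eq]
        omega
      · unfold pvStartsAt
        rw [PySem.Chars.startswith_iff]
        simpa using hj
  cases hA : (pvHits n).contains p <;> cases hB : PySem.Str.isIn p n <;>
    simp_all

-- splitting A's disjunctive conditions into consecutive rules
theorem pvIteOr (a b : Bool) (x y : Option String) :
    (if (a || b) then x else y) = if a then x else if b then x else y := by
  cases a <;> simp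

theorem pvIteAndOr (a b c : Bool) (x y : Option String) :
    (if (a && (b || c)) then x else y) =
      if (a && b) then x else if (a && c) then x else y := by
  cases a <;> cases b <;> cases c <;> simp

-- ===== VERDICT (by name: the statement is the Claim_ definition above) =====
theorem identify_certification_type_py_spec : Claim_equal_identify_certification_type_py := by
  intro s _
  unfold Spec_identify_certification_type_py
  unfold identify_certification_type_py identify_certification_type_py_alt
  by_cases h : s = ""
  · simp [h]
  · simp only [if_neg h]
    have hc : ∀ p ∈ pvPatterns, (pvHits (PySem.Str.upper s)).contains p = PySem.Str.isIn p (PySem.Str.upper s) := by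
      intro p hp
      refine pvHits_contains _ p hp ?_
      fin_cases hp <;> decide
    simp only [pvRules, pvResolve, List.all_cons, List.all_nil, Bool.and_true]
    simp only [hc _ (by decide : ("JCI" : String) ∈ pvPatterns),
      hc _ (by decide : ("JOINT COMMISSION INTERNATIONAL" : String) ∈ pvPatterns),
      hc _ (by decide : ("WHO" : String) ∈ pvPatterns),
      hc _ (by decide : ("CERTIFICATION" : String) ∈ pvPatterns),
      hc _ (by decide : ("STANDARD" : String) ∈ pvPatterns),
      hc _ (by decide : ("ISO 9001" : String) ∈ pvPatterns),
      hc _ (by decide : ("ISO9001" : String) ∈ pvPatterns),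
      hc _ (by decide : ("ISO 13485" : String) ∈ pvPatterns),
      hc _ (by decide : ("ISO13485" : String) ∈ pvPatterns),
      hc _ (by decide : ("ISO 15189" : String) ∈ pvPatterns),
      hc _ (by decide : ("ISO15189" : String) ∈ pvPatterns),
      hc _ (by decide : ("ISO 27001" : String) ∈ pvPatterns),
      hc _ (by decide : ("ISO27001" : String) ∈ pvPatterns),
      hc _ (by decide : ("ISO 45001" : String) ∈ pvPatterns),
      hc _ (by decide : ("ISO45001" : String) ∈ pvPatterns),
      hc _ (by decide : ("ISO 14001" : String) ∈ pvPatterns),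
      hc _ (by decide : ("ISO14001" : String) ∈ pvPatterns),
      hc _ (by decide : ("JOINT COMMISSION" : String) ∈ pvPatterns),
      hc _ (by decide : ("MAGNET" : String) ∈ pvPatterns),
      hc _ (by decide : ("DNV" : String) ∈ pvPatterns),
      hc _ (by decide : ("ACCREDITATION CANADA" : String) ∈ pvPatterns),
      hc _ (by decide : ("CQC" : String) ∈ pvPatterns),
      hc _ (by decide : ("CARE QUALITY COMMISSION" : String) ∈ pvPatterns),
      hc _ (by decide : ("HAS" : String) ∈ pvPatterns),
      hc _ (by decide : ("HAUTE AUTORITÉ" : String) ∈ pvPatterns),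
      hc _ (by decide : ("G-BA" : String) ∈ pvPatterns),
      hc _ (by decide : ("ACHS" : String) ∈ pvPatterns),
      hc _ (by decide : ("JCQHC" : String) ∈ pvPatterns),
      hc _ (by decide : ("TJCHA" : String) ∈ pvPatterns),
      hc _ (by decide : ("NABH" : String) ∈ pvPatterns),
      hc _ (by decide : ("NABL" : String) ∈ pvPatterns),
      hc _ (by decide : ("CBAHI" : String) ∈ pvPatterns),
      hc _ (by decide : ("HAAD" : String) ∈ pvPatterns),
      hc _ (by decide : ("COHSASA" : String) ∈ pvPatterns),
      hc _ (by decide : ("CAP" : String) ∈ pvPatterns),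
      hc _ (by decide : ("COLLEGE OF AMERICAN PATHOLOGISTS" : String) ∈ pvPatterns),
      hc _ (by decide : ("CLIA" : String) ∈ pvPatterns),
      hc _ (by decide : ("EA" : String) ∈ pvPatterns),
      hc _ (by decide : ("LABORATORY" : String) ∈ pvPatterns)]
    simp only [pvOrElse_scan_cons, pvOrElse_scan_nil, pvIteOr, pvIteAndOr]
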